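-- pv_equiv track=rewrite | github.com/akuazuk/cursor_instagram | ig_apify_scrape.py | _pick_baseline_profile
-- ===== SOURCE A (Python) =====
-- from typing import Any, Iterable, Optional
--
-- def _normalize_profile_url(url: str) -> str:
--     u = url.strip()
--     if not u:
--         return u
--     if not u.startswith("http"):
--         u = "https://" + u.lstrip("/")
--     if not u.endswith("/"):
--         u += "/"
--     return u
--
-- def _pick_baseline_profile(bench_rows: list[dict[str, Any]], baseline: str) -> str:
--     b = (baseline or "").strip().lower()
--     if not bench_rows:
--         return baseline
--     # If user passed a URL - match by profile_url
--     if b.startswith("http"):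
--         b_url = _normalize_profile_url(baseline)
--         for r in bench_rows:
--             if _normalize_profile_url(str(r.get("profile_url") or "")) == b_url:
--                 return str(r.get("profile") or baseline)
--     # exact match first
--     for r in bench_rows:
--         p = str(r.get("profile") or "")
--         if p.lower() == b:
--             return p
--     # match by profile_url substring (e.g. "kravira.by")
--     for r in bench_rows:
--         u = str(r.get("profile_url") or "").lower()
--         if b and b in u:
--             return str(r.get("profile") or baseline)
--     # substring match
--     for r in bench_rows:
--         p = str(r.get("profile") or "")
--         if b and b in p.lower():
--             return p
--     # default: first row
--     return str(bench_rows[0].get("profile") or baseline)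
-- ===== SOURCE B (Python) =====
-- def _normalize_profile_url(url: str) -> str:
--     u = url.strip()
--     if not u:
--         return u
--     if not u.startswith("http"):
--         u = "https://" + u.lstrip("/")
--     if not u.endswith("/"):
--         u += "/"
--     return u
--
-- def _pick_baseline_profile(bench_rows, baseline):
--     b = (baseline or "").strip().lower()
--     if not bench_rows:
--         return baseline
--     is_url = b.startswith("http")
--     b_url = _normalize_profile_url(baseline)
--     url_match = exact_match = url_sub = prof_sub = None
--     for r in bench_rows:
--         p = str(r.get("profile") or "")
--         if url_match is None and is_url and _normalize_profile_url(str(r.get("profile_url") or "")) == b_url: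
--             url_match = str(r.get("profile") or baseline)
--         if exact_match is None and p.lower() == b:
--             exact_match = p
--         if url_sub is None and b and b in str(r.get("profile_url") or "").lower():
--             url_sub = str(r.get("profile") or baseline)
--         if prof_sub is None and b and b in p.lower():
--             prof_sub = p
--     for v in (url_match, exact_match, url_sub, prof_sub):
--         if v is not None:
--             return v
--     return str(bench_rows[0].get("profile") or baseline)
-- ===== Notes on version B (the rewrite author's own statement) =====
-- stated objective: alternative
-- what changed: Replaces A's four sequential scans over bench_rows (plus the separate URL pass) with one single pass maintaining four first-hit Optional holders, returning them in precedence order afterwards.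
import Mathlib
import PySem

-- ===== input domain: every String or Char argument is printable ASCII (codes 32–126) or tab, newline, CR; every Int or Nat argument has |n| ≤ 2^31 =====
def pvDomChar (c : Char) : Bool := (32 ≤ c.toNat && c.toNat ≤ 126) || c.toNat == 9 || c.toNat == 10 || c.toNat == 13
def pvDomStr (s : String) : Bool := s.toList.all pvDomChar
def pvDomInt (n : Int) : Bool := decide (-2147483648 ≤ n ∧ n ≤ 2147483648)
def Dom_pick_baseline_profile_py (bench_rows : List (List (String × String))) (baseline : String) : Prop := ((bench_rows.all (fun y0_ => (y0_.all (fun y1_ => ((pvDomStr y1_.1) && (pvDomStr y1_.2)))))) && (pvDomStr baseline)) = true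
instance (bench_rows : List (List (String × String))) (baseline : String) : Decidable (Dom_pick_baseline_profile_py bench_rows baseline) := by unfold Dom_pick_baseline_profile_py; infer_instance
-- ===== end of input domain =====

-- B replaces A's four sequential scans with ONE pass keeping four first-hit Option holders (objective: alternative decomposition, same cost class).

-- ===== PORT A =====
-- str(r.get(k) or "")  (values are strings; falsy = "")
def pvGetStr (r : List (String × String)) (k : String) : String :=
  ((PySem.Dict.mk r).get? k).getD ""
-- str(r.get(k) or dflt)
def pvGetOr (r : List (String × String)) (k dflt : String) : String :=
  match (PySem.Dict.mk r).get? k with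
  | none => dflt
  | some v => if v = "" then dflt else v
-- _normalize_profile_url; u.lstrip("/") ported by hand as dropWhile (· == '/') (exact: lstrip with an explicit char set)
def pvNormUrl (url : String) : String :=
  let u := PySem.Str.strip url
  if u = "" then u
  else
    let u := if PySem.Str.startswith u "http" then u
             else "https://" ++ String.ofList (u.toList.dropWhile (· == '/'))
    if PySem.Str.endswith u "/" then u else u ++ "/"
-- the url-equality pass
def pvLoopUrl (rows : List (List (String × String))) (bUrl baseline : String) : Option String :=
  match rows with
  | [] => none
  | r :: rest =>
    if pvNormUrl (pvGetStr r "profile_url") = bUrl then some (pvGetOr r "profile" baseline)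
    else pvLoopUrl rest bUrl baseline
-- the exact-match pass
def pvLoopExact (rows : List (List (String × String))) (b : String) : Option String :=
  match rows with
  | [] => none
  | r :: rest =>
    let p := pvGetStr r "profile"
    if PySem.Str.lower p = b then some p else pvLoopExact rest b
-- the url-substring pass
def pvLoopUsub (rows : List (List (String × String))) (b baseline : String) : Option String :=
  match rows with
  | [] => none
  | r :: rest =>
    if b ≠ "" ∧ PySem.Str.isIn b (PySem.Str.lower (pvGetStr r "profile_url")) = true
    then some (pvGetOr r "profile" baseline)
    else pvLoopUsub rest b baseline
-- the profile-substring pass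
def pvLoopPsub (rows : List (List (String × String))) (b : String) : Option String :=
  match rows with
  | [] => none
  | r :: rest =>
    let p := pvGetStr r "profile"
    if b ≠ "" ∧ PySem.Str.isIn b (PySem.Str.lower p) = true
    then some p else pvLoopPsub rest b

def pick_baseline_profile_py (bench_rows : List (List (String × String))) (baseline : String) : String :=
  let b := PySem.Str.lower (PySem.Str.strip baseline)
  match bench_rows with
  | [] => baseline
  | r0 :: _ =>
    match (if PySem.Str.startswith b "http"
           then pvLoopUrl bench_rows (pvNormUrl baseline) baseline else none) with
    | some s => s
    | none =>
      match pvLoopExact bench_rows b with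
      | some s => s
      | none =>
        match pvLoopUsub bench_rows b baseline with
        | some s => s
        | none =>
          match pvLoopPsub bench_rows b with
          | some s => s
          | none => pvGetOr r0 "profile" baseline

-- ===== PORT B =====
-- one step of B's single pass: update the four first-hit holders
def pvAltStep (isUrl : Bool) (bUrl b baseline : String)
    (st : Option String × Option String × Option String × Option String)
    (r : List (String × String)) :
    Option String × Option String × Option String × Option String :=
  let p := pvGetStr r "profile"
  ((st.1.or (if isUrl ∧ pvNormUrl (pvGetStr r "profile_url") = bUrl
             then some (pvGetOr r "profile" baseline) else none)),
   (st.2.1.or (if PySem.Str.lower p = b then some p else none)),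
   (st.2.2.1.or (if b ≠ "" ∧ PySem.Str.isIn b (PySem.Str.lower (pvGetStr r "profile_url")) = true
                 then some (pvGetOr r "profile" baseline) else none)),
   (st.2.2.2.or (if b ≠ "" ∧ PySem.Str.isIn b (PySem.Str.lower p) = true
                 then some p else none)))

def pick_baseline_profile_py_alt (bench_rows : List (List (String × String))) (baseline : String) : String :=
  let b := PySem.Str.lower (PySem.Str.strip baseline)
  match bench_rows with
  | [] => baseline
  | r0 :: _ =>
    let isUrl := PySem.Str.startswith b "http"
    let bUrl := pvNormUrl baseline
    let st := bench_rows.foldl (pvAltStep isUrl bUrl b baseline) (none, none, none, none)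
    ((st.1.or (st.2.1.or (st.2.2.1.or st.2.2.2))).getD (pvGetOr r0 "profile" baseline))

-- ===== PRECONDITION & SPEC =====
def Spec_pick_baseline_profile_py (bench_rows : List (List (String × String))) (baseline : String) (out : String) : Prop := out = pick_baseline_profile_py_alt bench_rows baseline
instance (bench_rows : List (List (String × String))) (baseline : String) (out : String) : Decidable (Spec_pick_baseline_profile_py bench_rows baseline out) := by unfold Spec_pick_baseline_profile_py; infer_instance

-- ===== CLAIM (what is proved, stated in full; the proofs are below) =====
def Claim_equal_pick_baseline_profile_py : Prop := ∀ (bench_rows : List (List (String × String))) (baseline : String), Dom_pick_baseline_profile_py bench_rows baseline → Spec_pick_baseline_profile_py bench_rows baseline (pick_baseline_profile_py bench_rows baseline)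

-- ===== LEMMAS AND PROOFS =====
-- B's fold computes, in each component, the corresponding pass of A (first hit wins)
theorem pvFold_eq (isUrl : Bool) (bUrl b baseline : String) :
    ∀ (rows : List (List (String × String)))
      (o0 o1 o2 o3 : Option String),
    rows.foldl (pvAltStep isUrl bUrl b baseline) (o0, o1, o2, o3) =
      (o0.or (if isUrl then pvLoopUrl rows bUrl baseline else none),
       o1.or (pvLoopExact rows b),
       o2.or (pvLoopUsub rows b baseline),
       o3.or (pvLoopPsub rows b)) := by
  intro rows
  induction rows with
  | nil =>
    intro o0 o1 o2 o3
    simp [pvLoopUrl, pvLoopExact, pvLoopUsub, pvLoopPsub]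
  | cons r rest ih =>
    intro o0 o1 o2 o3
    simp only [List.foldl_cons, pvAltStep, ih]
    refine Prod.ext ?_ (Prod.ext ?_ (Prod.ext ?_ ?_)) <;>
      simp only [pvLoopUrl, pvLoopExact, pvLoopUsub, pvLoopPsub, Option.or_assoc] <;>
      congr 1 <;> split_ifs <;> simp_all

theorem pvChain (x0 x1 x2 x3 : Option String) (d : String) :
    (match x0 with
     | some s => s
     | none =>
       match x1 with
       | some s => s
       | none =>
         match x2 with
         | some s => s
         | none =>
           match x3 with
           | some s => s
           | none => d) = (x0.or (x1.or (x2.or x3))).getD d := by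
  rcases x0 <;> rcases x1 <;> rcases x2 <;> rcases x3 <;> rfl

theorem pick_baseline_profile_py_spec' :
    ∀ (bench_rows : List (List (String × String))) (baseline : String),
    pick_baseline_profile_py bench_rows baseline = pick_baseline_profile_py_alt bench_rows baseline := by
  intro rows baseline
  cases rows with
  | nil => rfl
  | cons r0 rest =>
    simp only [pick_baseline_profile_py, pick_baseline_profile_py_alt, pvFold_eq, Option.none_or]
    rw [pvChain]

-- ===== VERDICT (by name: the statement is the Claim_ definition above) =====
theorem pick_baseline_profile_py_spec : Claim_equal_pick_baseline_profile_py := by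
  intro rows baseline _
  exact pick_baseline_profile_py_spec' rows baseline
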